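-- pv_equiv track=rewrite | github.com/anup0556/Robot-Movement | robot.py | execute_commands
-- ===== SOURCE A (Python) =====
-- GRID_WIDTH = 5
--
-- GRID_HEIGHT = 4
--
-- initial_position = (0, 0)  # (row, column)
--
-- initial_direction = 'S'
--
-- MOVEMENTS = {
--     'N': (-1, 0),  # North: move up in the grid (decrease row)
--     'E': (0, 1),   # East: move right in the grid (increase column)
--     'S': (1, 0),   # South: move down in the grid (increase row)
--     'W': (0, -1)   # West: move left in the grid (decrease column)
-- }
--
-- def execute_commands(commands):
--     position = list(initial_position)
--     direction = initial_direction
--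
--     for command in commands:
--         if command in 'NEWS':
--             if direction != command:
--                 direction = command
--         elif command == 'M':
--             new_position = [
--                 position[0] + MOVEMENTS[direction][0],
--                 position[1] + MOVEMENTS[direction][1]
--             ]
--
--
--             if 0 <= new_position[0] < GRID_HEIGHT and 0 <= new_position[1] < GRID_WIDTH:
--                 position = new_position
--
--     return tuple(position), direction
-- ===== SOURCE B (Python) =====
-- GRID_WIDTH = 5
-- GRID_HEIGHT = 4
-- MOVEMENTS = {
--     'N': (-1, 0),
--     'E': (0, 1),
--     'S': (1, 0),
--     'W': (0, -1)
-- }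
--
-- def _flush(row, col, direction, pending):
--     dr, dc = MOVEMENTS[direction]
--     row = max(0, min(GRID_HEIGHT - 1, row + dr * pending))
--     col = max(0, min(GRID_WIDTH - 1, col + dc * pending))
--     return row, col
--
-- def execute_commands(commands):
--     row, col = 0, 0
--     direction = 'S'
--     pending = 0
--     for ch in commands:
--         if ch in 'NEWS':
--             if pending:
--                 row, col = _flush(row, col, direction, pending)
--                 pending = 0
--             direction = ch
--         elif ch == 'M':
--             pending += 1
--     if pending:
--         row, col = _flush(row, col, direction, pending)
--     return (row, col), direction
-- ===== Notes on version B (the rewrite author's own statement) =====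
-- stated objective: alternative
-- what changed: B scans the commands once keeping the current direction and a run-length counter of pending consecutive move commands, and flushes each run at once by adding count*delta and clamping into the grid with max/min, instead of A's per-step bound-checked single moves.
import Mathlib
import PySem

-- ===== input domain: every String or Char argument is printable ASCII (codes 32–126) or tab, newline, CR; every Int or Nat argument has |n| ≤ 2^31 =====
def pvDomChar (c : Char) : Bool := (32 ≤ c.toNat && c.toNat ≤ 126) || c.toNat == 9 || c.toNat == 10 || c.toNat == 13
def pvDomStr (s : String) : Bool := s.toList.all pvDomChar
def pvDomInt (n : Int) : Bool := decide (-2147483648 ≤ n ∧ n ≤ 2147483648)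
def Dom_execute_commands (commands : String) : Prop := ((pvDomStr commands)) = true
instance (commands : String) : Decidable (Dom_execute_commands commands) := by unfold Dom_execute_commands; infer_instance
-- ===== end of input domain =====

-- B replaces A's per-step bound-checked moves by run-length counting of consecutive 'M's
-- flushed with one clamped arithmetic update per run (objective: alternative decomposition).

-- ===== PORT A =====
-- MOVEMENTS dict lookup (direction is always one of the four keys when looked up)
def pvMovements (dir : String) : Int × Int :=
  if dir = "N" then (-1, 0)
  else if dir = "E" then (0, 1)
  else if dir = "S" then (1, 0)
  else (0, -1)

-- one iteration of A's for-loop: state = (position, direction)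
def pvAStep (st : (Int × Int) × String) (c : Char) : (Int × Int) × String :=
  if c = 'N' ∨ c = 'E' ∨ c = 'W' ∨ c = 'S' then
    (st.1, if st.2 ≠ c.toString then c.toString else st.2)
  else if c = 'M' then
    let mv := pvMovements st.2
    let np : Int × Int := (st.1.1 + mv.1, st.1.2 + mv.2)
    if 0 ≤ np.1 ∧ np.1 < 4 ∧ 0 ≤ np.2 ∧ np.2 < 5 then (np, st.2) else st
  else st

def execute_commands (commands : String) : (Int × Int) × String :=
  commands.toList.foldl pvAStep ((0, 0), "S")

-- ===== PORT B =====
-- flush a run of `p` pending moves at once, clamping into the grid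
def pvBFlush (r c : Int) (dir : String) (p : Int) : Int × Int :=
  let mv := pvMovements dir
  (max 0 (min 3 (r + mv.1 * p)), max 0 (min 4 (c + mv.2 * p)))

-- one iteration of B's loop: state = (position, direction, pending)
def pvBStep (st : (Int × Int) × String × Int) (ch : Char) : (Int × Int) × String × Int :=
  if ch = 'N' ∨ ch = 'E' ∨ ch = 'W' ∨ ch = 'S' then
    let pos := if st.2.2 ≠ 0 then pvBFlush st.1.1 st.1.2 st.2.1 st.2.2 else st.1
    (pos, ch.toString, 0)
  else if ch = 'M' then (st.1, st.2.1, st.2.2 + 1)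
  else st

def execute_commands_alt (commands : String) : (Int × Int) × String :=
  let st := commands.toList.foldl pvBStep ((0, 0), "S", 0)
  let pos := if st.2.2 ≠ 0 then pvBFlush st.1.1 st.1.2 st.2.1 st.2.2 else st.1
  (pos, st.2.1)

-- ===== PRECONDITION & SPEC =====
def Spec_execute_commands (commands : String) (out : (Int × Int) × String) : Prop := out = execute_commands_alt commands
instance (commands : String) (out : (Int × Int) × String) : Decidable (Spec_execute_commands commands out) := by unfold Spec_execute_commands; infer_instance

-- ===== CLAIM (what is proved, stated in full; the proofs are below) =====
def Claim_equal_execute_commands : Prop := ∀ (commands : String), Dom_execute_commands commands → Spec_execute_commands commands (execute_commands commands)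

-- ===== LEMMAS AND PROOFS =====

-- invariant: B's stored position is in bounds, pending ≥ 0, direction is one of the
-- four keys, and A's state equals B's state with the pending run flushed.
def pvInv (a : (Int × Int) × String) (b : (Int × Int) × String × Int) : Prop :=
  0 ≤ b.1.1 ∧ b.1.1 < 4 ∧ 0 ≤ b.1.2 ∧ b.1.2 < 5 ∧ 0 ≤ b.2.2 ∧
  (b.2.1 = "N" ∨ b.2.1 = "E" ∨ b.2.1 = "S" ∨ b.2.1 = "W") ∧
  a = (pvBFlush b.1.1 b.1.2 b.2.1 b.2.2, b.2.1)

lemma pvBFlush_zero (r c : Int) (dir : String) (h1 : 0 ≤ r) (h2 : r < 4)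
    (h3 : 0 ≤ c) (h4 : c < 5) : pvBFlush r c dir 0 = (r, c) := by
  simp [pvBFlush]; omega

lemma pvToString_mem (c : Char) (hc : c = 'N' ∨ c = 'E' ∨ c = 'W' ∨ c = 'S') :
    c.toString = "N" ∨ c.toString = "E" ∨ c.toString = "S" ∨ c.toString = "W" := by
  rcases hc with h|h|h|h <;> subst h <;> decide

lemma pvBFlush_bounds (r c0 : Int) (dir : String) (q : Int)
    (hdir : dir = "N" ∨ dir = "E" ∨ dir = "S" ∨ dir = "W") :
    0 ≤ (pvBFlush r c0 dir q).1 ∧ (pvBFlush r c0 dir q).1 < 4 ∧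
    0 ≤ (pvBFlush r c0 dir q).2 ∧ (pvBFlush r c0 dir q).2 < 5 := by
  rcases hdir with h|h|h|h <;> subst h <;> simp [pvBFlush, pvMovements] <;> omega

lemma pvInv_step (a : (Int × Int) × String) (b : (Int × Int) × String × Int)
    (c : Char) (h : pvInv a b) : pvInv (pvAStep a c) (pvBStep b c) := by
  obtain ⟨⟨r, c0⟩, dir, p⟩ := b
  obtain ⟨h1, h2, h3, h4, h5, hdir, heq⟩ := h
  dsimp only at h1 h2 h3 h4 h5 hdir
  subst heq
  by_cases hc : c = 'N' ∨ c = 'E' ∨ c = 'W' ∨ c = 'S'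
  · -- direction command: B flushes the pending run and resets it
    simp only [pvAStep, pvBStep, if_pos hc]
    by_cases hp : p = 0
    · subst hp
      have hz := pvBFlush_zero r c0 dir h1 h2 h3 h4
      refine ⟨h1, h2, h3, h4, le_refl 0, pvToString_mem c hc, ?_⟩
      simp [hz]
      exact (pvBFlush_zero r c0 _ h1 h2 h3 h4).symm
    · simp only [ne_eq, hp, not_false_iff, if_pos]
      obtain ⟨b1, b2, b3, b4⟩ := pvBFlush_bounds r c0 dir p hdir
      refine ⟨b1, b2, b3, b4, le_refl 0, pvToString_mem c hc, ?_⟩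
      simp
      rw [pvBFlush_zero _ _ _ b1 b2 b3 b4]
  · by_cases hm : c = 'M'
    · subst hm
      have hb : pvBStep ((r, c0), dir, p) 'M' = ((r, c0), dir, p + 1) := by
        simp [pvBStep]
      rw [hb]
      refine ⟨h1, h2, h3, h4, by dsimp only; omega, hdir, ?_⟩
      rcases hdir with h|h|h|h <;> subst h <;>
        simp [pvAStep, pvBFlush, pvMovements] <;>
        split_ifs <;> simp [Prod.ext_iff] <;> omega
    · simp only [pvAStep, pvBStep, if_neg hc, if_neg hm]
      exact ⟨h1, h2, h3, h4, h5, hdir, rfl⟩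

lemma pvInv_fold (l : List Char) (a : (Int × Int) × String)
    (b : (Int × Int) × String × Int) (h : pvInv a b) :
    pvInv (l.foldl pvAStep a) (l.foldl pvBStep b) := by
  induction l generalizing a b with
  | nil => exact h
  | cons c t ih => exact ih _ _ (pvInv_step a b c h)

-- ===== VERDICT (by name: the statement is the Claim_ definition above) =====
theorem execute_commands_spec : Claim_equal_execute_commands := by
  intro commands _
  have h := pvInv_fold commands.toList ((0, 0), "S") ((0, 0), "S", 0)
    (by refine ⟨by norm_num, by norm_num, by norm_num, by norm_num, le_refl 0, Or.inr (Or.inr (Or.inl rfl)), ?_⟩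
        simp [pvBFlush, pvMovements])
  unfold Spec_execute_commands execute_commands execute_commands_alt
  obtain ⟨h1, h2, h3, h4, h5, _, heq⟩ := h
  rw [heq]
  by_cases hp : (commands.toList.foldl pvBStep ((0, 0), "S", 0)).2.2 ≠ 0
  · simp [hp]
  · push_neg at hp
    simp [hp, pvBFlush_zero _ _ _ h1 h2 h3 h4]
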